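-- pv_equiv track=rewrite | github.com/james7132/b2blaze | aiob2/utilities.py | get_part_ranges
-- ===== SOURCE A (Python) =====
-- def get_part_ranges(content_length, part_size):
--     next_offest = 0
--     while content_length > 0:
--         if content_length < part_size:
--             part_size = content_length
--         yield (next_offest, part_size)
--         next_offest += part_size
--         content_length -= part_size
-- ===== SOURCE B (Python) =====
-- def get_part_ranges(content_length, part_size):
--     if content_length <= 0:
--         return
--     full, rem = divmod(content_length, part_size)
--     for i in range(full):
--         yield (i * part_size, part_size)
--     if rem:
--         yield (full * part_size, rem)
-- ===== Notes on version B (the rewrite author's own statement) =====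
-- stated objective: alternative
-- what changed: B computes the part count and final remainder once with divmod(content_length, part_size), emits the full-size parts by enumerating their indices (offset = i*part_size) and appends the single remainder part, instead of A's while loop that mutates content_length, next_offset and part_size.
import Mathlib
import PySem

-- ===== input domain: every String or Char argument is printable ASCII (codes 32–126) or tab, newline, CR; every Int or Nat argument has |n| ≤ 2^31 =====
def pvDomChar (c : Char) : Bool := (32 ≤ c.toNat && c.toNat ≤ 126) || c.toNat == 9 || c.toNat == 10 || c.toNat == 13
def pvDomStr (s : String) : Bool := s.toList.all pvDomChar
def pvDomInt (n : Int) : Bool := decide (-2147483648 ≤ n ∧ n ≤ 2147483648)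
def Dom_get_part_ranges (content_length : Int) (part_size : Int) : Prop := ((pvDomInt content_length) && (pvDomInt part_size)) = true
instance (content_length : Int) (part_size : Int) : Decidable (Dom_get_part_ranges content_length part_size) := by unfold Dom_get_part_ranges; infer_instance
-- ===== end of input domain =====

-- ===== PORT A =====
-- B replaces A's stateful while loop by one divmod: it enumerates the full parts by index and appends the remainder part (objective: alternative).
-- Port of A's while-loop as fuel recursion; fuel content_length.toNat suffices whenever part_size > 0
-- (each iteration removes at least 1 from content_length); for part_size ≤ 0 < content_length the Python loops forever (outside Pre_).
def pvGoA (fuel : Nat) (content_length next_offest part_size : Int) : List (Int × Int) :=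
  match fuel with
  | 0 => []
  | f + 1 =>
    if content_length > 0 then
      let part_size' := if content_length < part_size then content_length else part_size
      (next_offest, part_size') ::
        pvGoA f (content_length - part_size') (next_offest + part_size') part_size'
    else []

def get_part_ranges (content_length : Int) (part_size : Int) : List (Int × Int) :=
  pvGoA content_length.toNat content_length 0 part_size

-- ===== PORT B =====
def get_part_ranges_alt (content_length : Int) (part_size : Int) : List (Int × Int) :=
  if content_length ≤ 0 then []
  else
    let full := PySem.Int.floordiv content_length part_size
    let rem := PySem.Int.mod content_length part_size
    ((PySem.List.pyRange 0 full 1).map (fun i => (i * part_size, part_size))) ++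
      (if rem ≠ 0 then [(full * part_size, rem)] else [])

-- ===== PRECONDITION & SPEC =====
-- Pre_ excludes only part_size ≤ 0 with content_length > 0: there A's while loop never terminates
-- (it diverges, returning nothing), so no equivalence can be stated.
def Pre_get_part_ranges (content_length : Int) (part_size : Int) : Prop :=
  content_length ≤ 0 ∨ 0 < part_size
instance (content_length : Int) (part_size : Int) : Decidable (Pre_get_part_ranges content_length part_size) := by unfold Pre_get_part_ranges; infer_instance
def pvWitness_get_part_ranges : Int × Int := (10, 4)
def Spec_get_part_ranges (content_length : Int) (part_size : Int) (out : List (Int × Int)) : Prop := out = get_part_ranges_alt content_length part_size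
instance (content_length : Int) (part_size : Int) (out : List (Int × Int)) : Decidable (Spec_get_part_ranges content_length part_size out) := by unfold Spec_get_part_ranges; infer_instance

-- ===== CLAIM (what is proved, stated in full; the proofs are below) =====
def Claim_equal_get_part_ranges : Prop := ∀ (content_length : Int) (part_size : Int), Dom_get_part_ranges content_length part_size → Pre_get_part_ranges content_length part_size → Spec_get_part_ranges content_length part_size (get_part_ranges content_length part_size)

-- ===== LEMMAS AND PROOFS =====

lemma pvGoA_nonpos (fuel : Nat) (cl next ps : Int) (h : cl ≤ 0) : pvGoA fuel cl next ps = [] := by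
  cases fuel <;> simp [pvGoA, show ¬ cl > 0 by omega]

lemma pvGoA_eq (ps : Int) (hps : 0 < ps) :
    ∀ (fuel : Nat) (cl next : Int), 0 ≤ cl → cl.toNat ≤ fuel →
      pvGoA fuel cl next ps =
        ((PySem.List.pyRange 0 (cl / ps) 1).map (fun i => (next + i * ps, ps))) ++
          (if cl % ps ≠ 0 then [(next + (cl / ps) * ps, cl % ps)] else []) := by
  intro fuel
  induction fuel with
  | zero =>
    intro cl next h0 hf
    have hcl : cl = 0 := by omega
    subst hcl
    simp [pvGoA_nonpos]
  | succ f ih =>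
    intro cl next h0 hf
    by_cases hcl : cl > 0
    · by_cases hlt : cl < ps
      · -- final short chunk
        have hdiv : cl / ps = 0 := Int.ediv_eq_zero_of_lt h0 hlt
        have hmod : cl % ps = cl := Int.emod_eq_of_lt h0 hlt
        simp only [pvGoA, if_pos hcl, if_pos hlt, hdiv, hmod]
        rw [pvGoA_nonpos _ _ _ _ (by omega)]
        simp [show cl ≠ 0 by omega]
      · -- full chunk of size ps
        have hle : ps ≤ cl := by omega
        simp only [pvGoA, if_pos hcl, if_neg hlt]
        rw [ih (cl - ps) (next + ps) (by omega) (by omega)]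
        have hdiv : cl / ps = (cl - ps) / ps + 1 := by
          have h := Int.add_mul_ediv_right (cl - ps) 1 (by omega : ps ≠ 0)
          rw [show cl - ps + 1 * ps = cl by ring] at h
          exact h
        have hmod : cl % ps = (cl - ps) % ps := by
          conv_lhs => rw [show cl = cl - ps + 1 * ps by ring]
          exact Int.add_mul_emod_self_right ..
        have hq0 : 0 ≤ (cl - ps) / ps := Int.ediv_nonneg (by omega) (by omega)
        rw [hdiv, hmod]
        rw [PySem.List.pyRange_one, PySem.List.pyRange_one]
        have ht : ((cl - ps) / ps + 1 - 0).toNat = ((cl - ps) / ps - 0).toNat + 1 := by omega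
        rw [ht, List.range_succ_eq_map]
        simp only [List.map_cons, List.map_map, Nat.cast_zero, zero_add, zero_mul,
          List.cons_append]
        congr 1
        · ring_nf
        congr 1
        · apply List.map_congr_left; intro k _
          simp only [Function.comp, Prod.mk.injEq, and_true]; push_cast; ring
        · split_ifs with h
          · simp only [List.cons.injEq, Prod.mk.injEq, and_true]; ring
          · rfl
    · have hcl0 : cl = 0 := by omega
      subst hcl0
      simp [pvGoA_nonpos]

-- ===== VERDICT (by name: the statement is the Claim_ definition above) =====
theorem get_part_ranges_spec : Claim_equal_get_part_ranges := by
  intro cl ps _ hpre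
  unfold Spec_get_part_ranges get_part_ranges get_part_ranges_alt
  by_cases h0 : cl ≤ 0
  · simp [pvGoA_nonpos _ _ _ _ h0, h0]
  · have hps : 0 < ps := by rcases hpre with h | h; omega; exact h
    rw [pvGoA_eq ps hps cl.toNat cl 0 (by omega) (le_refl _)]
    simp only [if_neg h0, PySem.Int.floordiv_eq_ediv_of_pos hps,
      PySem.Int.mod_eq_emod_of_pos hps, zero_add]
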